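-- pv_equiv track=rewrite | github.com/borica/grokking-algorithms | chapter_4/4.1_4.3.py | highest_number_in_list
-- ===== SOURCE A (Python) =====
-- from typing import List
--
-- def highest_number_in_list(list_to_rank: List) -> int:
--     if not len(list_to_rank):
--         return 0
--
--     number = list_to_rank.pop()
--     highest_number = highest_number_in_list(list_to_rank)
--
--     if number > highest_number:
--         return number
--
--     return highest_number
-- ===== SOURCE B (Python) =====
-- from typing import List
--
-- def highest_number_in_list(list_to_rank: List) -> int:
--     highest_number = 0
--     while list_to_rank:
--         number = list_to_rank.pop()
--         if number > highest_number:
--             highest_number = number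
--     return highest_number
-- ===== Notes on version B (the rewrite author's own statement) =====
-- stated objective: simpler
-- what changed: Replaces the linear recursion (one stack frame per element) with a single iterative pop loop carrying a 0-initialized accumulator; the same pop-from-the-end mutation of the input list is preserved.
import Mathlib
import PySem

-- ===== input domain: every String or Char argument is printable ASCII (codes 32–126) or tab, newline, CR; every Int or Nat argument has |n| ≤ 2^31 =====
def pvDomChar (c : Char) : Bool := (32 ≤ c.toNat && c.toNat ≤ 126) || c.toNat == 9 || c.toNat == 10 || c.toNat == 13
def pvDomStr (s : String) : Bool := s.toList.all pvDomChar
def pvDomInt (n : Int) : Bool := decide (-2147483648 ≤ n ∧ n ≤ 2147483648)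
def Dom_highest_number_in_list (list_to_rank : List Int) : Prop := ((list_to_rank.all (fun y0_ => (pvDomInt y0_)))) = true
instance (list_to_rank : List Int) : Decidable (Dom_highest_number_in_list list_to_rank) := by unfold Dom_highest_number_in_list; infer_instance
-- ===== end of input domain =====

-- B replaces A's linear recursion with an iterative pop loop (0-initialized accumulator);
-- both Pythons empty the argument list in place (equivalence proved on the return value).


-- ===== PORT A =====
-- recursion: pop the last element, recurse on the rest, keep the larger
def highest_number_in_list (list_to_rank : List Int) : Int :=
  if h : list_to_rank = [] then 0
  else
    let number := list_to_rank.getLast h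
    let hn := highest_number_in_list list_to_rank.dropLast
    if number > hn then number else hn
termination_by list_to_rank.length
decreasing_by simp [List.length_dropLast]; exact List.length_pos_of_ne_nil h

-- ===== PORT B =====
-- iterative loop: while the list is nonempty, pop its last element and update the accumulator
def pvAltLoop (highest_number : Int) (list_to_rank : List Int) : Int :=
  if h : list_to_rank = [] then highest_number
  else
    let number := list_to_rank.getLast h
    pvAltLoop (if number > highest_number then number else highest_number) list_to_rank.dropLast
termination_by list_to_rank.length
decreasing_by simp [List.length_dropLast]; exact List.length_pos_of_ne_nil h

def highest_number_in_list_alt (list_to_rank : List Int) : Int :=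
  pvAltLoop 0 list_to_rank

-- ===== PRECONDITION & SPEC =====
def Spec_highest_number_in_list (list_to_rank : List Int) (out : Int) : Prop := out = highest_number_in_list_alt list_to_rank
instance (list_to_rank : List Int) (out : Int) : Decidable (Spec_highest_number_in_list list_to_rank out) := by unfold Spec_highest_number_in_list; infer_instance

-- ===== CLAIM (what is proved, stated in full; the proofs are below) =====
def Claim_equal_highest_number_in_list : Prop := ∀ (list_to_rank : List Int), Dom_highest_number_in_list list_to_rank → Spec_highest_number_in_list list_to_rank (highest_number_in_list list_to_rank)

-- ===== LEMMAS AND PROOFS =====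

-- A's result is nonnegative (the floor 0 of the base case).
theorem pvA_nonneg (l : List Int) : 0 ≤ highest_number_in_list l := by
  induction hn : l.length using Nat.strong_induction_on generalizing l with
  | _ n ih =>
    rw [highest_number_in_list]
    by_cases h : l = []
    · simp [h]
    · simp only [h, dite_false]
      have hrec := ih l.dropLast.length (by subst hn; simpa using List.length_pos_of_ne_nil h) l.dropLast rfl
      split <;> omega

-- loop invariant: the loop computes the max of the accumulator and A's result
theorem pvAltLoop_eq (l : List Int) (acc : Int) (hacc : 0 ≤ acc) :
    pvAltLoop acc l = max acc (highest_number_in_list l) := by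
  induction hn : l.length using Nat.strong_induction_on generalizing l acc with
  | _ n ih =>
    rw [pvAltLoop, highest_number_in_list]
    by_cases h : l = []
    · simp [h]; omega
    · simp only [h, dite_false]
      rw [ih l.dropLast.length (by subst hn; simpa using List.length_pos_of_ne_nil h)
            l.dropLast _ (by split <;> omega) rfl]
      split <;> split <;> omega

-- ===== VERDICT (by name: the statement is the Claim_ definition above) =====
theorem highest_number_in_list_spec : Claim_equal_highest_number_in_list := by
  intro l _
  unfold Spec_highest_number_in_list highest_number_in_list_alt
  rw [pvAltLoop_eq l 0 le_rfl]
  have := pvA_nonneg l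
  omega
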